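-- pv_equiv track=rewrite | github.com/14vimal2/md-simulation | new_cpp_code/visualize.py | extractVar
-- ===== SOURCE A (Python) =====
-- def extractVar(txt : str):
--     if '//' in txt:
--         txt = txt[:txt.index('//')].strip()
--     txt = txt[1:].strip()[6:]
--
--     length = len(txt)
--     ans = ''
--     for i in range(1, length):
--         if txt[i] == ' ' and txt[i-1] == ' ':
--             continue
--         else:
--             ans += txt[i]
--     return ans
-- ===== SOURCE B (Python) =====
-- def extractVar(txt: str):
--     if '//' in txt:
--         txt = txt[:txt.index('//')].strip()
--     txt = txt[1:].strip()[6:]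
--     while '  ' in txt:
--         txt = txt.replace('  ', ' ')
--     return txt[1:]
-- ===== Notes on version B (the rewrite author's own statement) =====
-- stated objective: faster
-- what changed: B replaces A's per-character Python loop (comparing each character with its predecessor and concatenating) by a fixpoint of str.replace collapsing doubled spaces, then a single [1:] slice reproducing A's skipped first character; the passes run in C, so B is measurably faster.
import Mathlib
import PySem

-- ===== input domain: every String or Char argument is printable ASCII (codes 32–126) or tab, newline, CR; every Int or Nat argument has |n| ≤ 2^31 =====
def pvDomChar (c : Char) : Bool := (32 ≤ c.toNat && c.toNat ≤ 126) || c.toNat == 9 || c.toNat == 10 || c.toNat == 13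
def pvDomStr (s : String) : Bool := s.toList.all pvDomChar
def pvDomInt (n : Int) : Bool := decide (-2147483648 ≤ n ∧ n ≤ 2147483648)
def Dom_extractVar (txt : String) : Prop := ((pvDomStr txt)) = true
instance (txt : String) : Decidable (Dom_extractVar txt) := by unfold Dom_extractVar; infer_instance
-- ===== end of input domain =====

-- B collapses doubled spaces by iterating str.replace to a fixpoint and then slices off the first character, instead of A's per-character scan; proved equal on all inputs; a timing run measured B faster.


-- ===== PORT A =====
-- txt.index('//') is PySem.Str.find here: under the guard '"//" in txt' it never raises and
-- equals find (first occurrence); the loop over range(1, length) is a foldl over pyRange;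
-- txt[i]/txt[i-1] are in range there, so pyGetD's default 'x' is never read.
def extractVar (txt : String) : String :=
  let txt1 := if PySem.Str.isIn "//" txt then
      PySem.Str.strip (PySem.Str.slice txt none (some (PySem.Str.find txt "//")))
    else txt
  let txt2 := PySem.Str.slice (PySem.Str.strip (PySem.Str.slice txt1 (some 1) none)) (some 6) none
  let cs := txt2.toList
  let ans := (PySem.List.pyRange 1 (cs.length : Int) 1).foldl
    (fun ans i =>
      if PySem.List.pyGetD cs i 'x' = ' ' ∧ PySem.List.pyGetD cs (i - 1) 'x' = ' ' then ans
      else ans ++ [PySem.List.pyGetD cs i 'x']) []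
  String.ofList ans

-- ===== PORT B =====
-- B's loop 'while "  " in txt: txt = txt.replace("  ", " ")' needs a termination argument:
-- replace('  ', ' ') strictly shrinks the string whenever '  ' occurs (pvRepLen_lt below,
-- cited by pvCollapseFix's decreasing_by; its proof goes through the structural form pvRepS
-- of Python's left-to-right non-overlapping replace).
def pvRep (cs : List Char) : List Char := PySem.Chars.replace cs [' ', ' '] [' ']

def pvRepS : List Char → List Char
  | ' ' :: ' ' :: t => ' ' :: pvRepS t
  | c :: t => c :: pvRepS t
  | [] => []

theorem pvRepS_cons (c : Char) (t : List Char)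
    (h : ¬ ([' ', ' '].isPrefixOf (c :: t) = true)) : pvRepS (c :: t) = c :: pvRepS t := by
  cases t with
  | nil =>
    by_cases hc : c = ' '
    · subst hc; rfl
    · simp [pvRepS, hc]
  | cons b t =>
    by_cases hc : c = ' '
    · by_cases hb : b = ' '
      · exact absurd (by subst hc hb; simp [List.isPrefixOf]) h
      · subst hc; simp [pvRepS, hb]
    · simp [pvRepS, hc]

theorem pvRep_go_eq : ∀ (fuel : Nat) (l acc : List Char), l.length ≤ fuel →
    PySem.Chars.replace.go [' ', ' '] [' '] fuel l acc = acc.reverse ++ pvRepS l := by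
  intro fuel
  induction fuel with
  | zero => intro l acc h; rw [List.length_eq_zero_iff.mp (Nat.le_zero.mp h)]; simp [PySem.Chars.replace.go, pvRepS]
  | succ n ih =>
    intro l acc h
    match l with
    | [] => simp [PySem.Chars.replace.go, pvRepS]
    | c :: t =>
      rw [PySem.Chars.replace.go]
      by_cases hp : [' ', ' '].isPrefixOf (c :: t) = true
      · obtain ⟨u, hu⟩ := List.isPrefixOf_iff_prefix.mp hp
        cases hu
        simp only [hp, if_pos]
        rw [ih]
        · simp [pvRepS]
        · simp at h ⊢; omega
      · simp only [hp, Bool.false_eq_true, ite_false]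
        rw [ih t (c :: acc) (by simp at h ⊢; omega), pvRepS_cons c t hp]
        simp

theorem pvRep_eq (cs : List Char) : pvRep cs = pvRepS cs := by
  show PySem.Chars.replace cs [' ', ' '] [' '] = pvRepS cs
  rw [PySem.Chars.replace]
  simp only [List.isEmpty_cons, Bool.false_eq_true, if_false]
  rw [pvRep_go_eq cs.length cs [] le_rfl]
  rfl

theorem pvRepS_len_le : ∀ (cs : List Char), (pvRepS cs).length ≤ cs.length := by
  intro cs
  fun_induction pvRepS <;> simp_all <;> omega

theorem pvRepS_len_lt : ∀ (cs : List Char),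
    PySem.Chars.isIn [' ', ' '] cs = true → (pvRepS cs).length < cs.length
  | [] => by simp [PySem.Chars.isIn_iff_infix]
  | c :: t => by
    intro h
    rw [PySem.Chars.isIn_iff_infix] at h
    by_cases hp : [' ', ' '].isPrefixOf (c :: t) = true
    · obtain ⟨u, hu⟩ := List.isPrefixOf_iff_prefix.mp hp
      cases hu
      have := pvRepS_len_le u
      simp [pvRepS]; omega
    · have ht : [' ', ' '] <:+: t := by
        rcases (List.infix_cons_iff).mp h with h1 | h2
        · exact absurd (List.isPrefixOf_iff_prefix.mpr h1) hp
        · exact h2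
      have := pvRepS_len_lt t (by rw [PySem.Chars.isIn_iff_infix]; exact ht)
      rw [pvRepS_cons c t hp]
      simpa using this

theorem pvRepLen_lt (cs : List Char) (h : PySem.Chars.isIn [' ', ' '] cs = true) :
    (pvRep cs).length < cs.length := by
  rw [pvRep_eq cs]
  exact pvRepS_len_lt cs h

def pvCollapseFix (cs : List Char) : List Char :=
  if h : PySem.Chars.isIn [' ', ' '] cs = true then pvCollapseFix (pvRep cs) else cs
termination_by cs.length
decreasing_by exact pvRepLen_lt cs h

def extractVar_alt (txt : String) : String :=
  let txt1 := if PySem.Str.isIn "//" txt then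
      PySem.Str.strip (PySem.Str.slice txt none (some (PySem.Str.find txt "//")))
    else txt
  let txt2 := PySem.Str.slice (PySem.Str.strip (PySem.Str.slice txt1 (some 1) none)) (some 6) none
  let cs := pvCollapseFix txt2.toList
  String.ofList (PySem.List.slice cs (some 1) none)

-- ===== PRECONDITION & SPEC =====
def Spec_extractVar (txt : String) (out : String) : Prop := out = extractVar_alt txt
instance (txt : String) (out : String) : Decidable (Spec_extractVar txt out) := by unfold Spec_extractVar; infer_instance

-- ===== CLAIM (what is proved, stated in full; the proofs are below) =====
def Claim_equal_extractVar : Prop := ∀ (txt : String), Dom_extractVar txt → Spec_extractVar txt (extractVar txt)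

-- ===== LEMMAS AND PROOFS =====

-- the previous-input-character collapse scan A performs
def pvG (p : Char) : List Char → List Char
  | [] => []
  | c :: t => if c = ' ' ∧ p = ' ' then pvG c t else c :: pvG c t

theorem pvG_of_no_dd : ∀ (t : List Char) (p : Char),
    ¬ ([' ', ' '] <:+: (p :: t)) → pvG p t = t
  | [], p => by intro _; rfl
  | c :: r, p => by
    intro h
    have hnc : ¬ (c = ' ' ∧ p = ' ') := by
      rintro ⟨rfl, rfl⟩
      exact h (List.infix_cons_iff.mpr (Or.inl ⟨r, rfl⟩))
    have ht : ¬ ([' ', ' '] <:+: (c :: r)) := fun hi =>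
      h (List.infix_cons_iff.mpr (Or.inr hi))
    simp only [pvG, if_neg hnc]
    rw [pvG_of_no_dd r c ht]

theorem pvG_rep : ∀ (cs : List Char) (p : Char), pvG p (pvRepS cs) = pvG p cs := by
  intro cs
  fun_induction pvRepS with
  | case1 t ih =>
    intro p
    by_cases hp : p = ' '
    · subst hp; simp [pvG, ih]
    · simp [pvG, hp, ih]
  | case2 c t h1 ih =>
    intro p
    simp [pvG, ih]
  | case3 => intro p; rfl

theorem pvCollapseFix_eq : ∀ (cs : List Char), pvCollapseFix cs = pvG 'x' cs := by
  intro cs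
  fun_induction pvCollapseFix with
  | case1 cs h ih => rw [ih, pvRep_eq, pvG_rep]
  | case2 cs h =>
    have hni : ¬ ([' ', ' '] <:+: ('x' :: cs)) := by
      rw [List.infix_cons_iff]
      rintro (⟨u, hu⟩ | hi)
      · simp at hu
      · exact h (by rw [PySem.Chars.isIn_iff_infix]; exact hi)
    rw [pvG_of_no_dd cs 'x' hni]

theorem pvFold_main : ∀ (n k : Nat) (cs acc : List Char), k + 1 + n = cs.length →
    (PySem.List.pyRange ((k : Int) + 1) (cs.length : Int) 1).foldl
      (fun ans i =>
        if PySem.List.pyGetD cs i 'x' = ' ' ∧ PySem.List.pyGetD cs (i - 1) 'x' = ' ' then ans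
        else ans ++ [PySem.List.pyGetD cs i 'x']) acc
    = acc ++ pvG (cs.getD k 'x') (cs.drop (k + 1)) := by
  intro n
  induction n with
  | zero =>
    intro k cs acc h
    rw [PySem.List.pyRange_one_eq_nil (by omega), List.drop_eq_nil_of_le (by omega)]
    simp [pvG]
  | succ m ih =>
    intro k cs acc h
    have hk1 : k + 1 < cs.length := by omega
    rw [PySem.List.pyRange_one_cons (by push_cast; omega)]
    simp only [List.foldl_cons]
    have g1 : PySem.List.pyGetD cs ((k : Int) + 1) 'x' = cs[k + 1] := by
      rw [show ((k : Int) + 1) = ((k + 1 : Nat) : Int) by push_cast; ring,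
        PySem.List.pyGetD_natCast, List.getD_eq_getElem cs 'x' hk1]
    have g2 : PySem.List.pyGetD cs ((k : Int) + 1 - 1) 'x' = cs.getD k 'x' := by
      rw [show ((k : Int) + 1 - 1) = ((k : Nat) : Int) by ring, PySem.List.pyGetD_natCast]
    have hdrop : cs.drop (k + 1) = cs[k + 1] :: cs.drop (k + 2) := by
      rw [List.drop_eq_getElem_cons hk1]
    have ih' := fun acc' => ih (k + 1) cs acc' (by omega)
    rw [g1, g2, hdrop]
    by_cases hc : cs[k + 1] = ' ' ∧ cs.getD k 'x' = ' '
    · rw [if_pos hc]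
      rw [show ((k : Int) + 1 + 1) = ((k + 1 : Nat) : Int) + 1 by push_cast; ring, ih']
      rw [List.getD_eq_getElem cs 'x' hk1]
      simp only [pvG, if_pos hc]
    · rw [if_neg hc]
      rw [show ((k : Int) + 1 + 1) = ((k + 1 : Nat) : Int) + 1 by push_cast; ring, ih']
      rw [List.getD_eq_getElem cs 'x' hk1]
      simp only [pvG, if_neg hc, List.append_assoc, List.singleton_append]

theorem pvFold_eq (cs : List Char) : ((PySem.List.pyRange 1 (cs.length : Int) 1).foldl
    (fun ans i =>
      if PySem.List.pyGetD cs i 'x' = ' ' ∧ PySem.List.pyGetD cs (i - 1) 'x' = ' ' then ans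
      else ans ++ [PySem.List.pyGetD cs i 'x']) []) = (pvG 'x' cs).tail := by
  match cs with
  | [] => rw [PySem.List.pyRange_one_eq_nil (by simp)]; rfl
  | c :: t =>
    have hm := pvFold_main t.length 0 (c :: t) [] (by simp; omega)
    simp only [Nat.cast_zero, zero_add] at hm
    rw [hm]
    simp only [List.getD_cons_zero, List.drop_one, List.tail_cons]
    have hg : pvG 'x' (c :: t) = c :: pvG c t := by
      simp [pvG, Char.ext_iff]
    rw [hg]
    rfl

-- ===== VERDICT (by name: the statement is the Claim_ definition above) =====
theorem extractVar_spec : Claim_equal_extractVar := by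
  intro txt _
  unfold Spec_extractVar extractVar extractVar_alt
  simp only [pvFold_eq, pvCollapseFix_eq, PySem.List.slice_from_one]
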